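-- pv_equiv track=rewrite | github.com/981377660LMT/algorithm-study | leetcode/3347. 执行操作后元素的最高频率 II-差分.py | maxFrequency
-- ===== SOURCE A (Python) =====
-- from collections import defaultdict
-- from typing import List
--
-- def min2(a: int, b: int) -> int:
--     return a if a < b else b
--
-- def max2(a: int, b: int) -> int:
--     return a if a > b else b
--
-- def maxFrequency(nums: List[int], k: int, numOperations: int) -> int:
--     counter = defaultdict(int)
--     diff = defaultdict(int)
--     visited = set()
--
--     for v in nums:
--         counter[v] += 1
--         diff[v - k] += 1
--         diff[v + k + 1] -= 1
--         visited |= {v - k, v, v + k + 1}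
--
--     curSum = 0
--     res = 0
--     for v in sorted(visited):
--         curSum += diff[v]
--         count = counter[v]
--         delta = curSum - count
--         res = max2(res, count + min2(numOperations, delta))
--     return res
-- ===== SOURCE B (Python) =====
-- from collections import Counter
-- from typing import List
--
--
-- def maxFrequency(nums: List[int], k: int, numOperations: int) -> int:
--     cnt = Counter(nums)
--     arr = sorted(nums)
--     pts = sorted({p for v in nums for p in (v - k, v, v + k + 1)})
--     lo = hi = 0
--     best = 0
--     for p in pts:
--         while hi < len(arr) and arr[hi] <= p + k:
--             hi += 1
--         while lo < len(arr) and arr[lo] <= p - k - 1: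
--             lo += 1
--         c = cnt[p]
--         best = max(best, c + min(numOperations, (hi - lo) - c))
--     return best
-- ===== Notes on version B (the rewrite author's own statement) =====
-- stated objective: alternative
-- what changed: Replaces the defaultdict difference-array + prefix-sum sweep with a sorted array scanned by two monotone pointers: for each candidate target point the coverage is read off as the difference of the two pointer positions instead of accumulating diff[] deltas.
import Mathlib
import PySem

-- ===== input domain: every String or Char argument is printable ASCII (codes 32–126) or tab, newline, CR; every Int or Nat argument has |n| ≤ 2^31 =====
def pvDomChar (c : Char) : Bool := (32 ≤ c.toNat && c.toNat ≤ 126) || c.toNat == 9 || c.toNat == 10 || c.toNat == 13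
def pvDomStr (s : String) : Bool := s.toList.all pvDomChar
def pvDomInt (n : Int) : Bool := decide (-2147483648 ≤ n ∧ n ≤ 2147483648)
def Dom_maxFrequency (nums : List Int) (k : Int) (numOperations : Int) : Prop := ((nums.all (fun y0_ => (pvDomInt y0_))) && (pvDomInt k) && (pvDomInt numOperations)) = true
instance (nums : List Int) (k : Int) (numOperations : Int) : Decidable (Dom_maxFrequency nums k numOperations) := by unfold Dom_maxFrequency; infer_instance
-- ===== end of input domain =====

-- B replaces A's difference-array-with-defaultdicts prefix-sum sweep by a sorted array
-- scanned with two monotone pointers (objective: alternative algorithm of the same cost).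

-- ===== PORT A =====
def min2 (a : Int) (b : Int) : Int := if a < b then a else b

def max2 (a : Int) (b : Int) : Int := if a > b then a else b

def maxFrequency (nums : List Int) (k : Int) (numOperations : Int) : Int :=
  -- one pass building counter, diff and visited, exactly as A's first loop
  let st := nums.foldl
    (fun (st : PySem.Dict Int Int × PySem.Dict Int Int × PySem.Set Int) v =>
      (st.1.modify v 0 (fun x => x + 1),
       (st.2.1.modify (v - k) 0 (fun x => x + 1)).modify (v + k + 1) 0 (fun x => x - 1),
       st.2.2.update [v - k, v, v + k + 1]))
    (PySem.Dict.empty, PySem.Dict.empty, PySem.Set.empty)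
  -- sweep over sorted(visited) accumulating curSum, exactly as A's second loop
  let fin := (PySem.List.sorted st.2.2 (fun x => x)).foldl
    (fun (acc : Int × Int) v =>
      let curSum := acc.1 + st.2.1.getD v 0
      let count := st.1.getD v 0
      let delta := curSum - count
      (curSum, max2 acc.2 (count + min2 numOperations delta)))
    (0, 0)
  fin.2

-- ===== PORT B =====
-- the inner 'while i < len(arr) and arr[i] <= bound: i += 1' loop of Source B
def pvAdvance (arr : List Int) (i : Nat) (bound : Int) : Nat :=
  if h : i < arr.length then
    if arr[i] ≤ bound then pvAdvance arr (i + 1) bound else i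
  else i
termination_by arr.length - i

def maxFrequency_alt (nums : List Int) (k : Int) (numOperations : Int) : Int :=
  let cnt := PySem.Dict.counter nums
  let arr := PySem.List.sorted nums (fun x => x)
  let pts := PySem.List.sorted
    (PySem.Set.ofList (nums.flatMap (fun v => [v - k, v, v + k + 1]))) (fun x => x)
  let fin := pts.foldl
    (fun (st : Nat × Nat × Int) p =>
      let hi := pvAdvance arr st.2.1 (p + k)
      let lo := pvAdvance arr st.1 (p - k - 1)
      let c := cnt.getD p 0
      (lo, hi, max st.2.2 (c + min numOperations ((hi : Int) - (lo : Int) - c))))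
    (0, 0, 0)
  fin.2.2

-- ===== PRECONDITION & SPEC =====
def Spec_maxFrequency (nums : List Int) (k : Int) (numOperations : Int) (out : Int) : Prop := out = maxFrequency_alt nums k numOperations
instance (nums : List Int) (k : Int) (numOperations : Int) (out : Int) : Decidable (Spec_maxFrequency nums k numOperations out) := by unfold Spec_maxFrequency; infer_instance

-- ===== CLAIM (what is proved, stated in full; the proofs are below) =====
def Claim_equal_maxFrequency : Prop := ∀ (nums : List Int) (k : Int) (numOperations : Int), Dom_maxFrequency nums k numOperations → Spec_maxFrequency nums k numOperations (maxFrequency nums k numOperations)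

-- ===== LEMMAS AND PROOFS =====

theorem min2_eq_min (a b : Int) : min2 a b = min a b := by
  unfold min2; rw [min_def]; split_ifs <;> omega

theorem max2_eq_max (a b : Int) : max2 a b = max a b := by
  unfold max2; rw [max_def]; split_ifs <;> omega

-- splitting A's one-pass triple fold into three independent folds
theorem stepSplit (k : Int) : ∀ (nums : List Int)
    (a b : PySem.Dict Int Int) (c : PySem.Set Int),
    nums.foldl
      (fun (st : PySem.Dict Int Int × PySem.Dict Int Int × PySem.Set Int) v =>
        (st.1.modify v 0 (fun x => x + 1),
         (st.2.1.modify (v - k) 0 (fun x => x + 1)).modify (v + k + 1) 0 (fun x => x - 1),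
         st.2.2.update [v - k, v, v + k + 1])) (a, b, c)
      = (nums.foldl (fun d v => d.modify v 0 (fun x => x + 1)) a,
         nums.foldl (fun d v => (d.modify (v - k) 0 (fun x => x + 1)).modify (v + k + 1) 0 (fun x => x - 1)) b,
         nums.foldl (fun (s : PySem.Set Int) v => s.update [v - k, v, v + k + 1]) c) := by
  intro nums
  induction nums with
  | nil => intro a b c; rfl
  | cons v vs ih => intro a b c; simp only [List.foldl_cons]; exact ih _ _ _

-- characterisation of A's diff map
theorem diff_getD (k q : Int) : ∀ (nums : List Int) (d : PySem.Dict Int Int),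
    (nums.foldl (fun d v => (d.modify (v - k) 0 (fun x => x + 1)).modify (v + k + 1) 0 (fun x => x - 1)) d).getD q 0
      = d.getD q 0
        + (nums.map (fun v => (if v - k = q then (1 : Int) else 0))).sum
        - (nums.map (fun v => (if v + k + 1 = q then (1 : Int) else 0))).sum := by
  intro nums
  induction nums with
  | nil => intro d; simp
  | cons v vs ih =>
    intro d
    have hm : ∀ (d : PySem.Dict Int Int) (a : Int) (f : Int → Int),
        (d.modify a 0 f).getD q 0 = if a = q then f (d.getD q 0) else d.getD q 0 := by
      intro d a f
      rw [PySem.Dict.getD_modify]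
      rcases eq_or_ne q a with rfl | h
      · simp
      · simp [h, Ne.symm h]
    simp only [List.foldl_cons, List.map_cons, List.sum_cons, ih, hm]
    split_ifs <;> omega

-- membership of A's visited set
theorem mem_foldl_update (k q : Int) : ∀ (nums : List Int) (s : PySem.Set Int),
    (q ∈ nums.foldl (fun (s : PySem.Set Int) v => s.update [v - k, v, v + k + 1]) s
      ↔ q ∈ s ∨ ∃ v ∈ nums, q = v - k ∨ q = v ∨ q = v + k + 1) := by
  intro nums
  induction nums with
  | nil => intro s; simp
  | cons v vs ih =>
    intro s
    simp only [List.foldl_cons, ih, PySem.Set.mem_update, List.mem_cons, List.mem_nil_iff]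
    constructor
    · rintro (⟨h | h⟩ | ⟨w, hw, h⟩)
      · exact Or.inl h
      · exact Or.inr ⟨v, by simp, by tauto⟩
      · exact Or.inr ⟨w, by simp [hw], h⟩
    · rintro (h | ⟨w, hw, h⟩)
      · exact Or.inl (Or.inl h)
      · rcases hw with rfl | hw
        · exact Or.inl (Or.inr (by tauto))
        · exact Or.inr ⟨w, hw, h⟩

theorem nodup_foldl_update (k : Int) : ∀ (nums : List Int) (s : PySem.Set Int),
    s.Nodup → (nums.foldl (fun (s : PySem.Set Int) v => s.update [v - k, v, v + k + 1]) s).Nodup := by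
  intro nums
  induction nums with
  | nil => intro s hs; exact hs
  | cons v vs ih =>
    intro s hs
    simp only [List.foldl_cons]
    exact ih _ (PySem.Set.nodup_update _ _ hs)

-- pvAdvance in closed form
theorem pvAdvance_eq (arr : List Int) (b : Int) : ∀ (n i : Nat), arr.length - i = n → i ≤ arr.length →
    pvAdvance arr i b = i + ((arr.drop i).takeWhile (fun a => decide (a ≤ b))).length := by
  intro n
  induction n with
  | zero =>
    intro i hn hi
    have hieq : i = arr.length := by omega
    rw [pvAdvance]
    simp [hieq]
  | succ m ih =>
    intro i hn hi
    have hlt : i < arr.length := by omega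
    rw [pvAdvance]
    rw [List.drop_eq_getElem_cons hlt, List.takeWhile_cons]
    by_cases hb : arr[i] ≤ b
    · simp only [dif_pos hlt, hb, decide_true, if_true, List.length_cons]
      rw [ih (i + 1) (by omega) (by omega)]
      omega
    · simp [hlt, hb]

theorem takeWhile_len_eq_countP (b : Int) : ∀ (l : List Int), l.Pairwise (· ≤ ·) →
    (l.takeWhile (fun a => decide (a ≤ b))).length = l.countP (fun a => decide (a ≤ b)) := by
  intro l hl
  induction l with
  | nil => simp
  | cons x xs ih =>
    rcases List.pairwise_cons.mp hl with ⟨hx, hxs⟩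
    by_cases hb : x ≤ b
    · simp [List.countP_cons, hb, ih hxs]
    · simp only [List.takeWhile_cons, hb, decide_false, if_false, List.length_nil,
        List.countP_cons, ite_false]
      have : xs.countP (fun a => decide (a ≤ b)) = 0 :=
        List.countP_eq_zero.mpr (fun a ha => by have := hx a ha; simp; omega)
      simp [this]

-- every position below countP (≤ b) of a sorted list holds a value ≤ b
theorem sorted_getElem_le_of_lt_countP (l : List Int) (hl : l.Pairwise (· ≤ ·)) (b : Int)
    (j : Nat) (hj : j < l.length) (hc : j < l.countP (fun a => decide (a ≤ b))) : l[j] ≤ b := by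
  rw [← takeWhile_len_eq_countP b l hl] at hc
  have hpre := List.takeWhile_prefix (l := l) (fun a => decide (a ≤ b))
  have hget := hpre.getElem hc
  have hmem : (l.takeWhile (fun a => decide (a ≤ b)))[j] ∈ l.takeWhile (fun a => decide (a ≤ b)) :=
    List.getElem_mem _
  have := List.mem_takeWhile_imp hmem
  rw [hget] at this
  simpa using this

theorem pvAdvance_count (arr : List Int) (hs : arr.Pairwise (· ≤ ·)) (b : Int) (i : Nat)
    (hi : i ≤ arr.length) (hpre : ∀ j (hj : j < arr.length), j < i → arr[j] ≤ b) :
    pvAdvance arr i b = arr.countP (fun a => decide (a ≤ b)) := by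
  rw [pvAdvance_eq arr b (arr.length - i) i rfl hi]
  rw [takeWhile_len_eq_countP b _ (hs.drop)]
  have htake : (arr.take i).countP (fun a => decide (a ≤ b)) = i := by
    have hall : ∀ a ∈ arr.take i, (fun a => decide (a ≤ b)) a = true := by
      intro a ha
      rcases List.mem_take_iff_getElem.mp ha with ⟨j, hm, rfl⟩
      simp only [decide_eq_true_eq]
      exact hpre j (by omega) (by omega)
    have := List.countP_eq_length.mpr hall
    rw [this, List.length_take]
    omega
  have hsplit : arr.countP (fun a => decide (a ≤ b))
      = (arr.take i).countP (fun a => decide (a ≤ b)) + (arr.drop i).countP (fun a => decide (a ≤ b)) := by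
    conv_lhs => rw [← List.take_append_drop i arr]
    exact List.countP_append
  omega

-- the two sweep loops agree, step by step
theorem loop_main (k numOps : Int) (nums arr : List Int)
    (hsort : arr.Pairwise (· ≤ ·)) (hperm : arr.Perm nums)
    (diffD counterD cntD : PySem.Dict Int Int)
    (hdiff : ∀ q, diffD.getD q 0
      = (nums.map (fun v => (if v - k = q then (1 : Int) else 0))).sum
        - (nums.map (fun v => (if v + k + 1 = q then (1 : Int) else 0))).sum)
    (hcount : ∀ q, counterD.getD q 0 = (nums.count q : Int))
    (hcnt : ∀ q, cntD.getD q 0 = (nums.count q : Int)) :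
    ∀ (suf pre : List Int), (pre ++ suf).Pairwise (· < ·) →
    (∀ v ∈ nums, v - k ∈ pre ++ suf) → (∀ v ∈ nums, v + k + 1 ∈ pre ++ suf) →
    ∀ (curSum res : Int) (lo hi : Nat),
    curSum = (nums.map (fun v => (if v - k ∈ pre then (1 : Int) else 0))).sum
      - (nums.map (fun v => (if v + k + 1 ∈ pre then (1 : Int) else 0))).sum →
    lo ≤ arr.length → hi ≤ arr.length →
    (∀ p ∈ suf, ∀ j (hj : j < arr.length), j < lo → arr[j] ≤ p - k - 1) →
    (∀ p ∈ suf, ∀ j (hj : j < arr.length), j < hi → arr[j] ≤ p + k) →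
    (suf.foldl
      (fun (acc : Int × Int) v =>
        let curSum := acc.1 + diffD.getD v 0
        let count := counterD.getD v 0
        let delta := curSum - count
        (curSum, max2 acc.2 (count + min2 numOps delta)))
      (curSum, res)).2
    = (suf.foldl
      (fun (st : Nat × Nat × Int) p =>
        let hi := pvAdvance arr st.2.1 (p + k)
        let lo := pvAdvance arr st.1 (p - k - 1)
        let c := cntD.getD p 0
        (lo, hi, max st.2.2 (c + min numOps ((hi : Int) - (lo : Int) - c))))
      (lo, hi, res)).2.2 := by
  intro suf
  induction suf with
  | nil =>
    intro pre _ _ _ curSum res lo hi _ _ _ _ _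
    rfl
  | cons p suf' ih =>
    intro pre hpair hkLo hkHi curSum res lo hi hcur hloLen hhiLen hlo hhi
    -- order facts
    have hprelt : ∀ q ∈ pre, q < p := by
      have h := (List.pairwise_append.mp hpair).2.2
      intro q hq; exact h q hq p (by simp)
    have hsuf'gt : ∀ q ∈ suf', p < q := by
      have h := (List.pairwise_append.mp hpair).2.1
      exact (List.pairwise_cons.mp h).1
    have hpnotpre : p ∉ pre := fun h => lt_irrefl p (hprelt p h)
    -- membership in the processed prefix is exactly "≤ p" for points of the full list
    have hchar : ∀ q, q ∈ pre ++ p :: suf' → (q ∈ pre ++ [p] ↔ q ≤ p) := by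
      intro q hq
      constructor
      · intro h
        rcases List.mem_append.mp h with h | h
        · exact le_of_lt (hprelt q h)
        · simp at h; omega
      · intro hle
        rcases List.mem_append.mp hq with h | h
        · exact List.mem_append.mpr (Or.inl h)
        · rcases List.mem_cons.mp h with rfl | h
          · simp
          · exact absurd hle (not_le.mpr (hsuf'gt q h))
    -- the two membership sums, stepped by one point and turned into counts
    have e1 : (nums.map (fun v => (if v - k ∈ pre then (1 : Int) else 0))).sum
            + (nums.map (fun v => (if v - k = p then (1 : Int) else 0))).sum
            = (nums.countP (fun v => decide (v ≤ p + k)) : Int) := by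
      rw [← PySem.List.sum_map_add_int]
      have hpt : ∀ v ∈ nums,
          (if v - k ∈ pre then (1 : Int) else 0) + (if v - k = p then (1 : Int) else 0)
          = (if (fun v => decide (v ≤ p + k)) v = true then (1 : Int) else 0) := by
        intro v hv
        have hin := hchar (v - k) (hkLo v hv)
        by_cases h1 : v - k ∈ pre
        · have hne : v - k ≠ p := fun he => hpnotpre (he ▸ h1)
          have hle : v - k ≤ p := hin.mp (List.mem_append.mpr (Or.inl h1))
          simp only [if_pos h1, if_neg hne]
          have : v ≤ p + k := by omega
          simp [this]
        · by_cases h2 : v - k = p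
          · have : v ≤ p + k := by omega
            rw [if_neg h1, if_pos h2]
            simp [this]
          · have hnle : ¬ v - k ≤ p := by
              intro hle
              rcases List.mem_append.mp (hin.mpr hle) with h | h
              · exact h1 h
              · simp at h; exact h2 h
            have : ¬ v ≤ p + k := by omega
            rw [if_neg h1, if_neg h2]
            simp [this]
      rw [List.map_congr_left hpt]
      exact PySem.List.sum_map_ite_one_zero _ _
    have e2 : (nums.map (fun v => (if v + k + 1 ∈ pre then (1 : Int) else 0))).sum
            + (nums.map (fun v => (if v + k + 1 = p then (1 : Int) else 0))).sum
            = (nums.countP (fun v => decide (v ≤ p - k - 1)) : Int) := by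
      rw [← PySem.List.sum_map_add_int]
      have hpt : ∀ v ∈ nums,
          (if v + k + 1 ∈ pre then (1 : Int) else 0) + (if v + k + 1 = p then (1 : Int) else 0)
          = (if (fun v => decide (v ≤ p - k - 1)) v = true then (1 : Int) else 0) := by
        intro v hv
        have hin := hchar (v + k + 1) (hkHi v hv)
        by_cases h1 : v + k + 1 ∈ pre
        · have hne : v + k + 1 ≠ p := fun he => hpnotpre (he ▸ h1)
          have hle : v + k + 1 ≤ p := hin.mp (List.mem_append.mpr (Or.inl h1))
          simp only [if_pos h1, if_neg hne]
          have : v ≤ p - k - 1 := by omega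
          simp [this]
        · by_cases h2 : v + k + 1 = p
          · have : v ≤ p - k - 1 := by omega
            rw [if_neg h1, if_pos h2]
            simp [this]
          · have hnle : ¬ v + k + 1 ≤ p := by
              intro hle
              rcases List.mem_append.mp (hin.mpr hle) with h | h
              · exact h1 h
              · simp at h; exact h2 h
            have : ¬ v ≤ p - k - 1 := by omega
            rw [if_neg h1, if_neg h2]
            simp [this]
      rw [List.map_congr_left hpt]
      exact PySem.List.sum_map_ite_one_zero _ _
    -- the stepped curSum, in count form
    have hcurstep : curSum + diffD.getD p 0
        = (nums.countP (fun v => decide (v ≤ p + k)) : Int)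
          - (nums.countP (fun v => decide (v ≤ p - k - 1)) : Int) := by
      rw [hcur, hdiff p]; omega
    -- ... and in processed-prefix form for the induction hypothesis
    have hcur' : curSum + diffD.getD p 0
        = (nums.map (fun v => (if v - k ∈ pre ++ [p] then (1 : Int) else 0))).sum
          - (nums.map (fun v => (if v + k + 1 ∈ pre ++ [p] then (1 : Int) else 0))).sum := by
      rw [hcur, hdiff p]
      have m1 : (nums.map (fun v => (if v - k ∈ pre ++ [p] then (1 : Int) else 0))).sum
          = (nums.map (fun v => (if v - k ∈ pre then (1 : Int) else 0))).sum
            + (nums.map (fun v => (if v - k = p then (1 : Int) else 0))).sum := by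
        rw [← PySem.List.sum_map_add_int]
        refine congrArg List.sum (List.map_congr_left ?_)
        intro v _
        by_cases h1 : v - k ∈ pre
        · have hne : v - k ≠ p := fun he => hpnotpre (he ▸ h1)
          simp [h1, hne]
        · by_cases h2 : v - k = p
          · rw [if_pos (List.mem_append.mpr (Or.inr (by simp [h2]))), if_neg h1, if_pos h2]
            norm_num
          · rw [if_neg (fun hm => by
              rcases List.mem_append.mp hm with h | h
              · exact h1 h
              · simp at h; exact h2 h), if_neg h1, if_neg h2]
            norm_num
      have m2 : (nums.map (fun v => (if v + k + 1 ∈ pre ++ [p] then (1 : Int) else 0))).sum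
          = (nums.map (fun v => (if v + k + 1 ∈ pre then (1 : Int) else 0))).sum
            + (nums.map (fun v => (if v + k + 1 = p then (1 : Int) else 0))).sum := by
        rw [← PySem.List.sum_map_add_int]
        refine congrArg List.sum (List.map_congr_left ?_)
        intro v _
        by_cases h1 : v + k + 1 ∈ pre
        · have hne : v + k + 1 ≠ p := fun he => hpnotpre (he ▸ h1)
          simp [h1, hne]
        · by_cases h2 : v + k + 1 = p
          · rw [if_pos (List.mem_append.mpr (Or.inr (by simp [h2]))), if_neg h1, if_pos h2]
            norm_num
          · rw [if_neg (fun hm => by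
              rcases List.mem_append.mp hm with h | h
              · exact h1 h
              · simp at h; exact h2 h), if_neg h1, if_neg h2]
            norm_num
      omega
    -- the two pointers land on the counts
    have hhi' : pvAdvance arr hi (p + k) = arr.countP (fun a => decide (a ≤ p + k)) :=
      pvAdvance_count arr hsort _ hi hhiLen (fun j hj hlt => hhi p (by simp) j hj hlt)
    have hlo' : pvAdvance arr lo (p - k - 1) = arr.countP (fun a => decide (a ≤ p - k - 1)) :=
      pvAdvance_count arr hsort _ lo hloLen (fun j hj hlt => hlo p (by simp) j hj hlt)
    have hcpHi : arr.countP (fun a => decide (a ≤ p + k)) = nums.countP (fun a => decide (a ≤ p + k)) :=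
      hperm.countP_eq _
    have hcpLo : arr.countP (fun a => decide (a ≤ p - k - 1)) = nums.countP (fun a => decide (a ≤ p - k - 1)) :=
      hperm.countP_eq _
    -- the two step results agree
    have hres : max2 res (counterD.getD p 0 + min2 numOps (curSum + diffD.getD p 0 - counterD.getD p 0))
        = max res (cntD.getD p 0
            + min numOps ((pvAdvance arr hi (p + k) : Int) - (pvAdvance arr lo (p - k - 1) : Int) - cntD.getD p 0)) := by
      rw [min2_eq_min, max2_eq_max, hcount, hcnt, hcurstep, hhi', hlo', hcpHi, hcpLo]
    rw [List.foldl_cons, List.foldl_cons]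
    refine Eq.trans ?_ (Eq.trans (ih (pre ++ [p])
      (by rw [List.append_assoc]; simpa using hpair)
      (fun v hv => by rw [List.append_assoc]; simpa using hkLo v hv)
      (fun v hv => by rw [List.append_assoc]; simpa using hkHi v hv)
      (curSum + diffD.getD p 0)
      (max2 res (counterD.getD p 0 + min2 numOps (curSum + diffD.getD p 0 - counterD.getD p 0)))
      (arr.countP (fun a => decide (a ≤ p - k - 1)))
      (arr.countP (fun a => decide (a ≤ p + k)))
      hcur'
      List.countP_le_length
      List.countP_le_length
      (fun p' hp' j hj hjlt => by
        have h1 : arr[j] ≤ p - k - 1 := sorted_getElem_le_of_lt_countP arr hsort _ j hj hjlt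
        have h2 : p < p' := hsuf'gt p' hp'
        omega)
      (fun p' hp' j hj hjlt => by
        have h1 : arr[j] ≤ p + k := sorted_getElem_le_of_lt_countP arr hsort _ j hj hjlt
        have h2 : p < p' := hsuf'gt p' hp'
        omega)) ?_)
    · rfl
    · have hinit : ((pvAdvance arr lo (p - k - 1), pvAdvance arr hi (p + k),
          max res (cntD.getD p 0 + min numOps ((pvAdvance arr hi (p + k) : Int)
            - (pvAdvance arr lo (p - k - 1) : Int) - cntD.getD p 0))) : Nat × Nat × Int)
          = (arr.countP (fun a => decide (a ≤ p - k - 1)), arr.countP (fun a => decide (a ≤ p + k)),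
             max2 res (counterD.getD p 0 + min2 numOps (curSum + diffD.getD p 0 - counterD.getD p 0))) := by
        rw [hres, hlo', hhi']
      exact congrArg (fun st : Nat × Nat × Int => (List.foldl
        (fun (st : Nat × Nat × Int) p =>
          let hi := pvAdvance arr st.2.1 (p + k)
          let lo := pvAdvance arr st.1 (p - k - 1)
          let c := cntD.getD p 0
          (lo, hi, max st.2.2 (c + min numOps ((hi : Int) - (lo : Int) - c)))) st suf').2.2) hinit.symm

-- ===== VERDICT (by name: the statement is the Claim_ definition above) =====
theorem maxFrequency_spec : Claim_equal_maxFrequency := by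
  intro nums k numOps _
  simp only [Spec_maxFrequency, maxFrequency, maxFrequency_alt]
  have hsortedeq :
      PySem.List.sorted
        (nums.foldl (fun (s : PySem.Set Int) v => s.update [v - k, v, v + k + 1]) PySem.Set.empty)
        (fun x => x)
      = PySem.List.sorted
        (PySem.Set.ofList (nums.flatMap (fun v => [v - k, v, v + k + 1]))) (fun x => x) := by
    apply PySem.List.sorted_eq_sorted_of_perm _ _ _ (fun a b h => h)
    rw [List.perm_ext_iff_of_nodup (nodup_foldl_update k nums PySem.Set.empty List.nodup_nil)
      (PySem.Set.nodup_ofList _)]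
    intro q
    rw [mem_foldl_update, PySem.Set.mem_ofList, List.mem_flatMap]
    constructor
    · rintro (h | ⟨v, hv, h⟩)
      · simp at h
      · exact ⟨v, hv, by rcases h with rfl | rfl | rfl <;> simp⟩
    · rintro ⟨v, hv, h⟩
      refine Or.inr ⟨v, hv, ?_⟩
      simpa using h
  have hmemPts : ∀ q, q ∈ PySem.List.sorted
      (PySem.Set.ofList (nums.flatMap (fun v => [v - k, v, v + k + 1]))) (fun x => x)
      ↔ ∃ v ∈ nums, q = v - k ∨ q = v ∨ q = v + k + 1 := by
    intro q
    rw [PySem.List.mem_sorted, PySem.Set.mem_ofList, List.mem_flatMap]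
    constructor
    · rintro ⟨v, hv, h⟩
      exact ⟨v, hv, by simpa using h⟩
    · rintro ⟨v, hv, h⟩
      exact ⟨v, hv, by rcases h with rfl | rfl | rfl <;> simp⟩
  rw [stepSplit]
  rw [hsortedeq]
  exact loop_main k numOps nums (PySem.List.sorted nums (fun x => x))
    (by simpa using PySem.List.sorted_pairwise nums (fun x => x))
    (PySem.List.sorted_perm nums _ false)
    _ _ _
    (fun q => by
      rw [diff_getD k q nums PySem.Dict.empty]
      have h0 : (PySem.Dict.empty : PySem.Dict Int Int).getD q 0 = 0 := rfl
      rw [h0]; ring)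
    (fun q => by
      rw [PySem.Dict.getD_foldl_modify_add_one nums PySem.Dict.empty q]
      have h0 : (PySem.Dict.empty : PySem.Dict Int Int).getD q 0 = 0 := rfl
      rw [h0]; ring)
    (fun q => PySem.Dict.getD_counter nums q)
    (PySem.List.sorted (PySem.Set.ofList (nums.flatMap (fun v => [v - k, v, v + k + 1]))) (fun x => x))
    []
    (by simpa using PySem.List.sorted_ofList_pairwise_lt (nums.flatMap (fun v => [v - k, v, v + k + 1])))
    (fun v hv => by simp only [List.nil_append]; exact (hmemPts (v - k)).mpr ⟨v, hv, by simp⟩)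
    (fun v hv => by simp only [List.nil_append]; exact (hmemPts (v + k + 1)).mpr ⟨v, hv, by simp⟩)
    0 0 0 0
    (by simp)
    (Nat.zero_le _) (Nat.zero_le _)
    (fun p _ j _ hlt => absurd hlt (Nat.not_lt_zero j))
    (fun p _ j _ hlt => absurd hlt (Nat.not_lt_zero j))
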